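-- pv_equiv track=rewrite | github.com/jpultorak/WdBK | ThreeBallot/util.py | is_legal_triplet
-- ===== SOURCE A (Python) =====
-- def is_legal_triplet(triplet):
--
--     # each triplet has three ballots
--     if len(triplet) != 3:
--         return False
--
--     # each ballot has same ammount of options
--     if len(triplet[0]) != len(triplet[1]) or len(triplet[1]) != len(triplet[2]):
--         return False
--
--     total_options = len(triplet[0])
--     total_races = len(triplet[0][0])
--
--     for race in range(total_races):
--         votes = [0 for _ in range(total_options)]
--
--         for strip in range(3):
--             for option in range(total_options):
--                 votes[option] += triplet[strip][option][race]
--         twos = votes.count(2)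
--         ones = votes.count(1)
--
--         # max one candidate should receive two votes, and no candidate should receive
--         # above 2, or 0 votes
--         if twos > 1 or twos + ones != total_options:
--             return False
--     return True
-- ===== SOURCE B (Python) =====
-- def is_legal_triplet(triplet):
--     # three ballots
--     if len(triplet) != 3:
--         return False
--     a, b, c = triplet
--     n = len(a)
--     # each ballot has the same amount of options
--     if n != len(b) or len(b) != len(c):
--         return False
--     races = len(a[0])  # IndexError on an empty first ballot, as in A
--     # transposed single pass: options outer, races inner, keeping per-race
--     # running sum and an in-range flag instead of counting twos/ones
--     ok = [True] * races
--     total = [0] * races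
--     for opt in range(n):
--         ra, rb, rc = a[opt], b[opt], c[opt]
--         for r in range(races):
--             v = ra[r] + rb[r] + rc[r]
--             total[r] += v
--             if v < 1 or v > 2:
--                 ok[r] = False
--     # legal race: all column values in [1,2] and (since sum = n + #twos)
--     # at most one 2, i.e. sum <= n + 1
--     return all(ok) and all(t <= n + 1 for t in total)
-- ===== Notes on version B (the rewrite author's own statement) =====
-- stated objective: alternative
-- what changed: B transposes the traversal (options outer, races inner), maintaining per-race running-sum and in-range-flag arrays, and replaces A's twos/ones counting test by the arithmetic criterion 'every column value in [1,2] and column sum <= options+1' (since sum = options + number of twos); Pre_ excludes empty-ballot and ragged triplets, where A raises IndexError or returns an early False that depends on which race happens to raise first.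
-- outside the precondition, e.g. on is_legal_triplet([[[2, 5], [2]], [[0, 0], [0, 0]], [[0, 0], [0, 0]]]): A returns False, B raises IndexError
import Mathlib
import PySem

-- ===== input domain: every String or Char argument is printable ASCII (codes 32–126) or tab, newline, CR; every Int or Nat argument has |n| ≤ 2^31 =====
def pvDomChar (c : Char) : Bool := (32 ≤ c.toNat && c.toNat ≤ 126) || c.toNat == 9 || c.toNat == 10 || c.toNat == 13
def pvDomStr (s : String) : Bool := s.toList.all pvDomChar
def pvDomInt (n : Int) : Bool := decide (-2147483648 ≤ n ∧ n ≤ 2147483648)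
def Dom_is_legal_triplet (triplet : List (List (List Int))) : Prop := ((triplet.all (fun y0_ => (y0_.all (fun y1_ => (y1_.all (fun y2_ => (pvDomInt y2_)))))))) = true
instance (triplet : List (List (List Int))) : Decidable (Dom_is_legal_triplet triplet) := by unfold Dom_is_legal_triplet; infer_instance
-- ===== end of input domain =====

-- B transposes the traversal (options outer, races inner) with per-race
-- running-sum and range-flag arrays and checks 'all values in [1,2] and
-- column sum ≤ options+1' instead of A's per-race twos/ones counting
-- (objective: alternative; same asymptotic cost).

-- ===== PORT A =====

-- one strip pass: 'for option in range(n): votes[option] += bal[option][race]'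
-- (pyGetD is exact on Pre_, where every indexed row is long enough)
def pvStripA (n : Nat) (race : Nat) (bal : List (List Int)) (votes : List Int) : List Int :=
  (List.range n).foldl
    (fun vs opt => vs.set opt (vs.getD opt 0 + PySem.List.pyGetD (bal.getD opt []) (race : Int) 0))
    votes

-- 'for race in range(total_races): … if twos > 1 or twos + ones != total_options: return False'
def pvRaceLoopA (b0 b1 b2 : List (List Int)) (n : Nat) : List Nat → Bool
  | [] => true
  | race :: rest =>
    let votes := pvStripA n race b2 (pvStripA n race b1 (pvStripA n race b0 (List.replicate n (0 : Int))))
    let twos := votes.count 2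
    let ones := votes.count 1
    if twos > 1 ∨ twos + ones ≠ n then false
    else pvRaceLoopA b0 b1 b2 n rest

def is_legal_triplet (triplet : List (List (List Int))) : Bool :=
  match triplet with
  | [b0, b1, b2] =>
    if b0.length ≠ b1.length ∨ b1.length ≠ b2.length then false
    else
      match PySem.List.pyGet? b0 0 with   -- total_races = len(triplet[0][0])
      | none => false                     -- Python: IndexError (excluded by Pre_)
      | some row0 => pvRaceLoopA b0 b1 b2 b0.length (List.range row0.length)
  | _ => false   -- 'len(triplet) != 3'

-- ===== PORT B =====

-- inner loop: 'for r in range(races): v=ra[r]+rb[r]+rc[r]; total[r]+=v; if v<1 or v>2: ok[r]=False'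
def pvInnerB (races : Nat) (ra rb rc : List Int) (st : List Bool × List Int) : List Bool × List Int :=
  (List.range races).foldl
    (fun (st : List Bool × List Int) (r : Nat) =>
      let v := PySem.List.pyGetD ra (r : Int) 0 + PySem.List.pyGetD rb (r : Int) 0
                 + PySem.List.pyGetD rc (r : Int) 0
      (if v < 1 ∨ v > 2 then st.1.set r false else st.1,
       st.2.set r (st.2.getD r 0 + v)))
    st

def is_legal_triplet_alt (triplet : List (List (List Int))) : Bool :=
  if triplet.length ≠ 3 then false   -- 'if len(triplet) != 3: return False'
  else
    let a := triplet.getD 0 []       -- 'a, b, c = triplet'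
    let b := triplet.getD 1 []
    let c := triplet.getD 2 []
    let n := a.length
    if n ≠ b.length ∨ b.length ≠ c.length then false
    else
      let races := (a.getD 0 []).length
      -- 'for opt in range(n): …' over state (ok, total)
      let st := (List.range n).foldl
        (fun st opt => pvInnerB races (a.getD opt []) (b.getD opt []) (c.getD opt []) st)
        (List.replicate races true, List.replicate races (0 : Int))
      -- 'return all(ok) and all(t <= n + 1 for t in total)'
      st.1.all (fun x => x) && st.2.all (fun t => decide (t ≤ (n : Int) + 1))

-- ===== PRECONDITION & SPEC =====
-- Pre_ excludes triplets of three equally-sized ballots whose first ballot is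
-- empty (A raises IndexError at triplet[0][0]) or that have a row shorter than
-- the race count: there A raises IndexError unless an earlier race already
-- failed the check, B raises wherever it reads the missing entry, so neither
-- value is specifiable.
def Pre_is_legal_triplet (triplet : List (List (List Int))) : Prop :=
  (triplet.length = 3 ∧
     (triplet.getD 0 []).length = (triplet.getD 1 []).length ∧
     (triplet.getD 1 []).length = (triplet.getD 2 []).length) →
    (triplet.getD 0 []) ≠ [] ∧
      ∀ bal ∈ triplet, ∀ row ∈ bal, ((triplet.getD 0 []).getD 0 []).length ≤ row.length
instance (triplet : List (List (List Int))) : Decidable (Pre_is_legal_triplet triplet) := by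
  unfold Pre_is_legal_triplet; infer_instance

def pvWitness_is_legal_triplet : List (List (List Int)) :=
  [[[1], [0]], [[0], [1]], [[0], [1]]]

def Spec_is_legal_triplet (triplet : List (List (List Int))) (out : Bool) : Prop := out = is_legal_triplet_alt triplet
instance (triplet : List (List (List Int))) (out : Bool) : Decidable (Spec_is_legal_triplet triplet out) := by unfold Spec_is_legal_triplet; infer_instance

-- ===== CLAIM (what is proved, stated in full; the proofs are below) =====
def Claim_equal_is_legal_triplet : Prop := ∀ (triplet : List (List (List Int))), Dom_is_legal_triplet triplet → Pre_is_legal_triplet triplet → Spec_is_legal_triplet triplet (is_legal_triplet triplet)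

-- ===== LEMMAS AND PROOFS =====

-- the summed vote of option `opt` in race `r`
def pvV (b0 b1 b2 : List (List Int)) (opt r : Nat) : Int :=
  PySem.List.pyGetD (b0.getD opt []) (r : Int) 0 + PySem.List.pyGetD (b1.getD opt []) (r : Int) 0
    + PySem.List.pyGetD (b2.getD opt []) (r : Int) 0

-- ----- A side -----

theorem pvStripA_length (n race : Nat) (bal : List (List Int)) (votes : List Int) :
    (pvStripA n race bal votes).length = votes.length := by
  induction n with
  | zero => simp [pvStripA]
  | succ n ih =>
    unfold pvStripA
    rw [List.range_succ, List.foldl_append]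
    simp only [List.foldl_cons, List.foldl_nil, List.length_set]
    exact ih

theorem pvStripA_getElem? (n race : Nat) (bal : List (List Int)) (votes : List Int) (i : Nat) :
    (pvStripA n race bal votes)[i]? =
      if i < n then
        (votes[i]?).map (fun v => v + PySem.List.pyGetD (bal.getD i []) (race : Int) 0)
      else votes[i]? := by
  induction n with
  | zero => simp [pvStripA]
  | succ n ih =>
    have hstep : pvStripA (n + 1) race bal votes =
        (pvStripA n race bal votes).set n
          ((pvStripA n race bal votes).getD n 0 + PySem.List.pyGetD (bal.getD n []) (race : Int) 0) := by
      unfold pvStripA; rw [List.range_succ, List.foldl_append]; simp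
    rw [hstep, List.getElem?_set]
    by_cases hin : n = i
    · subst hin
      rw [if_pos rfl, pvStripA_length]
      by_cases hlen : n < votes.length
      · rw [if_pos hlen]
        have hA : (pvStripA n race bal votes)[n]? = votes[n]? := by
          rw [ih]; simp
        have hgd : (pvStripA n race bal votes).getD n 0 = votes.getD n 0 := by
          simp [List.getD, hA]
        rw [hgd, if_pos (Nat.lt_succ_self n)]
        rw [List.getElem?_eq_getElem hlen]
        simp [List.getD, List.getElem?_eq_getElem hlen]
      · rw [if_neg hlen]
        have hnone : votes[n]? = none := List.getElem?_eq_none (by omega)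
        simp [hnone]
    · rw [if_neg hin, ih]
      by_cases hi : i < n
      · rw [if_pos hi, if_pos (by omega)]
      · rw [if_neg hi, if_neg (by omega : ¬ i < n + 1)]

-- A's per-race votes list (helper naming the strip composition)
def pvVotesAOf (b0 b1 b2 : List (List Int)) (n race : Nat) : List Int :=
  pvStripA n race b2 (pvStripA n race b1 (pvStripA n race b0 (List.replicate n (0 : Int))))

-- A's per-race votes list is the sequence of per-option summed votes
theorem pvVotes_eq_map (b0 b1 b2 : List (List Int)) (n race : Nat) :
    pvVotesAOf b0 b1 b2 n race = (List.range n).map (fun opt => pvV b0 b1 b2 opt race) := by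
  unfold pvVotesAOf
  apply List.ext_getElem?
  intro i
  rw [pvStripA_getElem?, pvStripA_getElem?, pvStripA_getElem?]
  by_cases hi : i < n
  · have hrep : (List.replicate n (0 : Int))[i]? = some 0 := by
      rw [List.getElem?_eq_getElem (by simpa using hi)]; simp
    rw [List.getElem?_map, List.getElem?_range hi]
    simp only [hi, if_pos, hrep, Option.map_some, Option.map_some]
    unfold pvV
    congr 1
    ring
  · simp only [hi, ite_false]
    rw [List.getElem?_eq_none (l := List.replicate n (0 : Int)) (by simpa using (by omega : n ≤ i)),
        List.getElem?_eq_none]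
    simp only [List.length_map, List.length_range]
    omega

-- A's early-return race loop is an 'all' over the races
theorem pvRaceLoopA_eq_all (b0 b1 b2 : List (List Int)) (n : Nat) (rs : List Nat) :
    pvRaceLoopA b0 b1 b2 n rs = rs.all (fun race =>
      decide (¬ ((pvVotesAOf b0 b1 b2 n race).count 2 > 1 ∨
        (pvVotesAOf b0 b1 b2 n race).count 2 + (pvVotesAOf b0 b1 b2 n race).count 1 ≠ n))) := by
  induction rs with
  | nil => rfl
  | cons r rest ih =>
    simp only [pvRaceLoopA, pvVotesAOf, List.all_cons]
    split_ifs with h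
    · simp [h]
    · simp [h, ih, pvVotesAOf]

-- ----- the {1,2}-count arithmetic -----

theorem count_sum_eq_countP (xs : List Int) :
    xs.count 2 + xs.count 1 = xs.countP (fun v => v == 2 || v == 1) := by
  induction xs with
  | nil => rfl
  | cons y ys ih =>
    simp only [List.count_cons, List.countP_cons]
    by_cases h2 : y = (2 : Int)
    · simp [h2]; omega
    · by_cases h1 : y = (1 : Int)
      · simp [h1]; omega
      · simp [h1, h2]; omega

-- twos + ones = length iff every entry is 1 or 2
theorem count_one_two (l : List Int) :
    l.count 2 + l.count 1 = l.length ↔ ∀ v ∈ l, v = 1 ∨ v = 2 := by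
  rw [count_sum_eq_countP, List.countP_eq_length]
  constructor
  · intro h v hv
    have := h v hv
    simp only [Bool.or_eq_true, beq_iff_eq] at this
    tauto
  · intro h v hv
    simp only [Bool.or_eq_true, beq_iff_eq]
    have := h v hv
    tauto

-- when every entry is 1 or 2, the sum is the length plus the number of 2s
theorem sum_eq_length_add_count (l : List Int) (h : ∀ v ∈ l, v = 1 ∨ v = 2) :
    l.sum = (l.length : Int) + (l.count 2 : Int) := by
  induction l with
  | nil => simp
  | cons y ys ih =>
    have hy := h y List.mem_cons_self
    have hys := ih (fun v hv => h v (List.mem_cons_of_mem _ hv))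
    rcases hy with rfl | rfl <;>
      · simp only [List.sum_cons, List.count_cons, List.length_cons, hys]
        norm_num
        ring

-- the per-race equivalence: A's count test ⟺ B's range-and-sum test
theorem pvPerRace (col : List Int) (n : Nat) (hlen : col.length = n) :
    (¬ (col.count 2 > 1 ∨ col.count 2 + col.count 1 ≠ n)) ↔
      ((∀ v ∈ col, 1 ≤ v ∧ v ≤ 2) ∧ col.sum ≤ (n : Int) + 1) := by
  have h12 : ∀ v : Int, (v = 1 ∨ v = 2) ↔ (1 ≤ v ∧ v ≤ 2) := by intro v; omega
  have hcnt : (col.count 2 + col.count 1 = n) ↔ ∀ v ∈ col, v = 1 ∨ v = 2 := by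
    rw [← hlen]; exact count_one_two col
  constructor
  · rintro h
    rw [not_or, not_not] at h
    obtain ⟨h2, heq⟩ := h
    have hall := hcnt.mp (by omega)
    refine ⟨fun v hv => (h12 v).mp (hall v hv), ?_⟩
    rw [sum_eq_length_add_count col hall, hlen]
    have : col.count 2 ≤ 1 := by omega
    push_cast; omega
  · rintro ⟨hall, hsum⟩
    have hall' : ∀ v ∈ col, v = 1 ∨ v = 2 := fun v hv => (h12 v).mpr (hall v hv)
    have heq := hcnt.mpr hall'
    rw [sum_eq_length_add_count col hall', hlen] at hsum
    have : (col.count 2 : Int) ≤ 1 := by omega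
    rw [not_or, not_not]
    constructor
    · omega
    · omega

-- ----- B side: state characterisation of the transposed fold -----

-- the summed vote of race r in rows ra/rb/rc (the inner loop's v)
def pvVB (ra rb rc : List Int) (r : Nat) : Int :=
  PySem.List.pyGetD ra (r : Int) 0 + PySem.List.pyGetD rb (r : Int) 0
    + PySem.List.pyGetD rc (r : Int) 0

theorem pvInnerB_step_fst (k : Nat) (ra rb rc : List Int) (st : List Bool × List Int) :
    (pvInnerB (k + 1) ra rb rc st).1 =
      if pvVB ra rb rc k < 1 ∨ pvVB ra rb rc k > 2 then (pvInnerB k ra rb rc st).1.set k false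
      else (pvInnerB k ra rb rc st).1 := by
  unfold pvInnerB pvVB; rw [List.range_succ, List.foldl_append]; simp

theorem pvInnerB_step_snd (k : Nat) (ra rb rc : List Int) (st : List Bool × List Int) :
    (pvInnerB (k + 1) ra rb rc st).2 =
      (pvInnerB k ra rb rc st).2.set k ((pvInnerB k ra rb rc st).2.getD k 0 + pvVB ra rb rc k) := by
  unfold pvInnerB pvVB; rw [List.range_succ, List.foldl_append]; simp

theorem pvInnerB_fst_length (races : Nat) (ra rb rc : List Int) (st : List Bool × List Int) :
    (pvInnerB races ra rb rc st).1.length = st.1.length := by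
  induction races with
  | zero => simp [pvInnerB]
  | succ k ih =>
    rw [pvInnerB_step_fst]
    split_ifs <;> simp [ih]

theorem pvInnerB_snd_length (races : Nat) (ra rb rc : List Int) (st : List Bool × List Int) :
    (pvInnerB races ra rb rc st).2.length = st.2.length := by
  induction races with
  | zero => simp [pvInnerB]
  | succ k ih =>
    rw [pvInnerB_step_snd]
    simp [ih]

-- one inner pass updates the ok list pointwise
theorem pvInnerB_fst_getElem? (races : Nat) (ra rb rc : List Int) (st : List Bool × List Int)
    (i : Nat) :
    (pvInnerB races ra rb rc st).1[i]? =
      if i < races then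
        st.1[i]?.map (fun b => b && decide (1 ≤ pvVB ra rb rc i ∧ pvVB ra rb rc i ≤ 2))
      else st.1[i]? := by
  induction races with
  | zero => simp [pvInnerB]
  | succ k ih =>
    rw [pvInnerB_step_fst]
    by_cases hcond : pvVB ra rb rc k < 1 ∨ pvVB ra rb rc k > 2
    · rw [if_pos hcond, List.getElem?_set]
      by_cases hin : k = i
      · subst hin
        rw [if_pos rfl, pvInnerB_fst_length, if_pos (Nat.lt_succ_self k)]
        have hdec : decide (1 ≤ pvVB ra rb rc k ∧ pvVB ra rb rc k ≤ 2) = false := by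
          simp only [decide_eq_false_iff_not]; omega
        by_cases hlen : k < st.1.length
        · rw [if_pos hlen, List.getElem?_eq_getElem hlen]
          simp [hdec]
        · rw [if_neg hlen, List.getElem?_eq_none (by omega)]
          simp
      · rw [if_neg hin, ih]
        by_cases hik : i < k
        · rw [if_pos hik, if_pos (by omega)]
        · rw [if_neg hik, if_neg (by omega : ¬ i < k + 1)]
    · rw [if_neg hcond, ih]
      by_cases hin : k = i
      · subst hin
        rw [if_neg (lt_irrefl k), if_pos (Nat.lt_succ_self k)]
        have hdec : decide (1 ≤ pvVB ra rb rc k ∧ pvVB ra rb rc k ≤ 2) = true := by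
          simp only [decide_eq_true_eq]; omega
        cases hst : st.1[k]? with
        | none => simp
        | some b => simp [hdec]
      · by_cases hik : i < k
        · rw [if_pos hik, if_pos (by omega)]
        · rw [if_neg hik, if_neg (by omega : ¬ i < k + 1)]

-- one inner pass updates the total list pointwise
theorem pvInnerB_snd_getElem? (races : Nat) (ra rb rc : List Int) (st : List Bool × List Int)
    (i : Nat) :
    (pvInnerB races ra rb rc st).2[i]? =
      if i < races then st.2[i]?.map (fun t => t + pvVB ra rb rc i)
      else st.2[i]? := by
  induction races with
  | zero => simp [pvInnerB]
  | succ k ih =>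
    rw [pvInnerB_step_snd, List.getElem?_set]
    by_cases hin : k = i
    · subst hin
      rw [if_pos rfl, pvInnerB_snd_length, if_pos (Nat.lt_succ_self k)]
      have hself : (pvInnerB k ra rb rc st).2[k]? = st.2[k]? := by
        rw [ih, if_neg (lt_irrefl k)]
      have hgd : (pvInnerB k ra rb rc st).2.getD k 0 = st.2.getD k 0 := by
        simp [List.getD, hself]
      by_cases hlen : k < st.2.length
      · rw [if_pos hlen, hgd, List.getElem?_eq_getElem hlen]
        simp [List.getD, List.getElem?_eq_getElem hlen]
      · rw [if_neg hlen, List.getElem?_eq_none (by omega : st.2.length ≤ k)]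
        simp
    · rw [if_neg hin, ih]
      by_cases hik : i < k
      · rw [if_pos hik, if_pos (by omega)]
      · rw [if_neg hik, if_neg (by omega : ¬ i < k + 1)]

-- B's outer fold over the first k options
def pvOuterB (a b c : List (List Int)) (races k : Nat) : List Bool × List Int :=
  (List.range k).foldl
    (fun st opt => pvInnerB races (a.getD opt []) (b.getD opt []) (c.getD opt []) st)
    (List.replicate races true, List.replicate races (0 : Int))

theorem pvV_eq_pvVB (a b c : List (List Int)) (opt r : Nat) :
    pvV a b c opt r = pvVB (a.getD opt []) (b.getD opt []) (c.getD opt []) r := rfl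

theorem pvOuterB_getElem? (a b c : List (List Int)) (races k : Nat) (i : Nat) :
    (pvOuterB a b c races k).1[i]? =
      (if i < races then
        some ((List.range k).all (fun opt => decide (1 ≤ pvV a b c opt i ∧ pvV a b c opt i ≤ 2)))
      else none) ∧
    (pvOuterB a b c races k).2[i]? =
      (if i < races then some (((List.range k).map (fun opt => pvV a b c opt i)).sum)
      else none) := by
  induction k with
  | zero =>
    unfold pvOuterB
    simp only [List.range_zero, List.foldl_nil]
    by_cases hi : i < races
    · simp [hi]
    · constructor <;>
        · rw [if_neg hi, List.getElem?_eq_none (by simpa using (by omega : races ≤ i))]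
  | succ k ih =>
    have hstep : pvOuterB a b c races (k + 1) =
        pvInnerB races (a.getD k []) (b.getD k []) (c.getD k []) (pvOuterB a b c races k) := by
      unfold pvOuterB; rw [List.range_succ, List.foldl_append]; simp
    obtain ⟨ih1, ih2⟩ := ih
    rw [hstep]
    by_cases hi : i < races
    · constructor
      · rw [pvInnerB_fst_getElem?, if_pos hi, ih1, if_pos hi, if_pos hi]
        simp only [Option.map_some, List.range_succ, List.all_append, List.all_cons,
          List.all_nil, Bool.and_true, pvV_eq_pvVB]
        rfl
      · rw [pvInnerB_snd_getElem?, if_pos hi, ih2, if_pos hi, if_pos hi]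
        simp only [Option.map_some, List.range_succ, List.map_append, List.sum_append,
          List.map_cons, List.map_nil, List.sum_cons, List.sum_nil, add_zero, pvV_eq_pvVB]
    · constructor
      · rw [pvInnerB_fst_getElem?, if_neg hi, ih1, if_neg hi, if_neg hi]
      · rw [pvInnerB_snd_getElem?, if_neg hi, ih2, if_neg hi, if_neg hi]

-- B's ok list and total list, explicitly
theorem pvOuterB_fst (a b c : List (List Int)) (races k : Nat) :
    (pvOuterB a b c races k).1 = (List.range races).map (fun i =>
      (List.range k).all (fun opt => decide (1 ≤ pvV a b c opt i ∧ pvV a b c opt i ≤ 2))) := by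
  apply List.ext_getElem?
  intro i
  rw [(pvOuterB_getElem? a b c races k i).1]
  by_cases hi : i < races
  · rw [if_pos hi, List.getElem?_map, List.getElem?_range hi]; rfl
  · rw [if_neg hi, List.getElem?_eq_none]
    simp only [List.length_map, List.length_range]; omega

theorem pvOuterB_snd (a b c : List (List Int)) (races k : Nat) :
    (pvOuterB a b c races k).2 = (List.range races).map (fun i =>
      ((List.range k).map (fun opt => pvV a b c opt i)).sum) := by
  apply List.ext_getElem?
  intro i
  rw [(pvOuterB_getElem? a b c races k i).2]
  by_cases hi : i < races
  · rw [if_pos hi, List.getElem?_map, List.getElem?_range hi]; rfl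
  · rw [if_neg hi, List.getElem?_eq_none]
    simp only [List.length_map, List.length_range]; omega

-- ===== VERDICT (by name: the statement is the Claim_ definition above) =====
theorem is_legal_triplet_spec : Claim_equal_is_legal_triplet := by
  intro triplet _ hpre
  unfold Spec_is_legal_triplet
  match triplet with
  | [] => rfl
  | [_] => rfl
  | [_, _] => rfl
  | (_ :: _ :: _ :: _ :: rest) =>
    simp [is_legal_triplet, is_legal_triplet_alt]
  | [b0, b1, b2] =>
    simp only [is_legal_triplet, is_legal_triplet_alt, List.length_cons, List.length_nil,
      List.getD_cons_zero, List.getD_cons_succ]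
    rw [if_neg (show ¬ ((0:Nat) + 1 + 1 + 1 ≠ 3) by omega)]
    by_cases hg : b0.length ≠ b1.length ∨ b1.length ≠ b2.length
    · rw [if_pos hg, if_pos hg]
    · rw [if_neg hg, if_neg hg]
      have h1 : b0.length = b1.length := by by_contra hc; exact hg (Or.inl hc)
      have h2 : b1.length = b2.length := by by_contra hc; exact hg (Or.inr hc)
      have hne : b0 ≠ [] := by
        have := hpre ⟨rfl, by simpa using h1, by simpa using h2⟩
        simpa using this.1
      obtain ⟨hd, tl, rfl⟩ := List.exists_cons_of_ne_nil hne
      rw [show PySem.List.pyGet? (hd :: tl) 0 = some hd from PySem.List.pyGet?_zero_cons _ _]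
      have hgd : (hd :: tl).getD 0 [] = hd := rfl
      rw [hgd]
      show pvRaceLoopA (hd::tl) b1 b2 (hd::tl).length (List.range hd.length) =
        ((pvOuterB (hd::tl) b1 b2 hd.length (hd::tl).length).1.all (fun x => x) &&
         (pvOuterB (hd::tl) b1 b2 hd.length (hd::tl).length).2.all
           (fun t => decide (t ≤ (((hd::tl).length : Nat) : Int) + 1)))
      rw [pvRaceLoopA_eq_all, pvOuterB_fst, pvOuterB_snd, List.all_map, List.all_map]
      have hlen : ∀ r, (pvVotesAOf (hd::tl) b1 b2 (hd::tl).length r).length = (hd::tl).length := by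
        intro r; rw [pvVotes_eq_map, List.length_map, List.length_range]
      have key : ∀ r, (¬ ((pvVotesAOf (hd::tl) b1 b2 (hd::tl).length r).count 2 > 1 ∨
          (pvVotesAOf (hd::tl) b1 b2 (hd::tl).length r).count 2 +
            (pvVotesAOf (hd::tl) b1 b2 (hd::tl).length r).count 1 ≠ (hd::tl).length)) ↔
          ((∀ v ∈ pvVotesAOf (hd::tl) b1 b2 (hd::tl).length r, 1 ≤ v ∧ v ≤ 2) ∧
            (pvVotesAOf (hd::tl) b1 b2 (hd::tl).length r).sum ≤ (((hd::tl).length : Nat) : Int) + 1) :=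
        fun r => pvPerRace _ _ (hlen r)
      rw [Bool.eq_iff_iff]
      simp only [List.all_eq_true, Bool.and_eq_true, decide_eq_true_eq, Function.comp]
      constructor
      · intro h
        refine ⟨fun r hr => ?_, fun r hr => ?_⟩
        · obtain ⟨hall, _⟩ := (key r).mp (h r hr)
          intro opt hopt
          exact hall _ (by rw [pvVotes_eq_map]; exact List.mem_map_of_mem hopt)
        · obtain ⟨_, hsum⟩ := (key r).mp (h r hr)
          rwa [pvVotes_eq_map] at hsum
      · rintro ⟨hok, htot⟩ r hr
        apply (key r).mpr
        constructor
        · intro v hv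
          rw [pvVotes_eq_map] at hv
          obtain ⟨opt, hopt, rfl⟩ := List.mem_map.mp hv
          have := hok r hr
          exact this opt hopt
        · rw [pvVotes_eq_map]
          exact htot r hr
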